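-- pv_equiv track=rewrite | github.com/stanislawq/AI-project | main.py | split_line_into_groups
-- ===== SOURCE A (Python) =====
-- def split_line_into_groups(boxes, space_x_thresh=15):
--     boxes.sort(key=lambda b: b[0])
--     sublines = []
--     current = [boxes[0]]
--     for i in range(1, len(boxes)):
--         x,y,w,h = boxes[i]
--         px,py,pw,ph = boxes[i-1]
--         gap = x - (px+pw)
--         if gap > space_x_thresh:
--             sublines.append(current)
--             current = [boxes[i]]
--         else:
--             current.append(boxes[i])
--     if current:
--         sublines.append(current)
--     return sublines
-- ===== SOURCE B (Python) =====
-- def split_line_into_groups(boxes, space_x_thresh=15):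
--     boxes.sort(key=lambda b: b[0])
--     n = len(boxes)
--     breaks = [i for i in range(1, n)
--               if boxes[i][0] - (boxes[i-1][0] + boxes[i-1][2]) > space_x_thresh]
--     bounds = [0] + breaks + [n]
--     return [boxes[bounds[j]:bounds[j+1]] for j in range(len(bounds) - 1)]
-- ===== Notes on version B (the rewrite author's own statement) =====
-- stated objective: alternative
-- what changed: Replaces the single stateful loop that grows/flushes a 'current' accumulator with a break-index computation: one comprehension lists the gap positions, then the grouping is produced by slicing the sorted list between consecutive boundaries.
import Mathlib
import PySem

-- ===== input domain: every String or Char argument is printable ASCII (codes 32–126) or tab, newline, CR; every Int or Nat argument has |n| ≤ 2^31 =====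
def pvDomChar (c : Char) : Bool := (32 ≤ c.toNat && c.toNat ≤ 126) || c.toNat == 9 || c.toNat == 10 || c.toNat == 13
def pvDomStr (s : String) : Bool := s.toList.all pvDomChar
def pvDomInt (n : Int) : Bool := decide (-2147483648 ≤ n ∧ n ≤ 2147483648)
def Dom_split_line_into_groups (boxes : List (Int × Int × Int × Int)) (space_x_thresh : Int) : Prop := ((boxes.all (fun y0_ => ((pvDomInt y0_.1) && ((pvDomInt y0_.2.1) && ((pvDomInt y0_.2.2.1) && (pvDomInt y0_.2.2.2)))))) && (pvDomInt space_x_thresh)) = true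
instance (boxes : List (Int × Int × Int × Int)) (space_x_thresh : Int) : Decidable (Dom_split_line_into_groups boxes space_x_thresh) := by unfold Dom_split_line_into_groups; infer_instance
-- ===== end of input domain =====

-- B replaces A's stateful accumulate-and-flush loop by computing the break indices and slicing
-- the sorted list between consecutive boundaries (objective: alternative decomposition).
-- Both Pythons sort `boxes` in place; the equivalence proved here is about the return value
-- (the mutation is identical in A and B anyway).

-- ===== PORT A =====
-- one step of A's for-loop: state = (sublines, current), i = loop index
def pvStepA (t : Int) (s : List (Int × Int × Int × Int))
    (st : List (List (Int × Int × Int × Int)) × List (Int × Int × Int × Int)) (i : Int) :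
    List (List (Int × Int × Int × Int)) × List (Int × Int × Int × Int) :=
  let b := PySem.List.pyGetD s i (0, 0, 0, 0)
  let p := PySem.List.pyGetD s (i - 1) (0, 0, 0, 0)
  if b.1 - (p.1 + p.2.2.1) > t then (st.1 ++ [st.2], [b]) else (st.1, st.2 ++ [b])

def split_line_into_groups (boxes : List (Int × Int × Int × Int)) (space_x_thresh : Int) : List (List (Int × Int × Int × Int)) :=
  let s := PySem.List.sorted boxes (fun b => b.1) false
  let st := (PySem.List.pyRange 1 (s.length : Int) 1).foldl (pvStepA space_x_thresh s)
    ([], [PySem.List.pyGetD s 0 (0, 0, 0, 0)])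
  if st.2 ≠ [] then st.1 ++ [st.2] else st.1

-- ===== PORT B =====
-- is index i a break position? (gap between box i-1 and box i exceeds the threshold)
def pvIsBreak (t : Int) (s : List (Int × Int × Int × Int)) (i : Int) : Bool :=
  let b := PySem.List.pyGetD s i (0, 0, 0, 0)
  let p := PySem.List.pyGetD s (i - 1) (0, 0, 0, 0)
  decide (b.1 - (p.1 + p.2.2.1) > t)

def split_line_into_groups_alt (boxes : List (Int × Int × Int × Int)) (space_x_thresh : Int) : List (List (Int × Int × Int × Int)) :=
  let s := PySem.List.sorted boxes (fun b => b.1) false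
  let n : Int := s.length
  let breaks := (PySem.List.pyRange 1 n 1).filter (pvIsBreak space_x_thresh s)
  let bounds := [0] ++ breaks ++ [n]
  (PySem.List.pyRange 0 ((bounds.length : Int) - 1) 1).map (fun j =>
    PySem.List.slice s (some (PySem.List.pyGetD bounds j 0)) (some (PySem.List.pyGetD bounds (j + 1) 0)))

-- ===== PRECONDITION & SPEC =====
-- Pre_ excludes only the empty list, on which A raises IndexError (boxes[0]).
def Pre_split_line_into_groups (boxes : List (Int × Int × Int × Int)) (space_x_thresh : Int) : Prop :=
  boxes ≠ []
instance (boxes : List (Int × Int × Int × Int)) (space_x_thresh : Int) : Decidable (Pre_split_line_into_groups boxes space_x_thresh) := by unfold Pre_split_line_into_groups; infer_instance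
def pvWitness_split_line_into_groups : (List (Int × Int × Int × Int)) × Int := ([(0, 0, 5, 5), (30, 0, 5, 5)], 15)

def Spec_split_line_into_groups (boxes : List (Int × Int × Int × Int)) (space_x_thresh : Int) (out : List (List (Int × Int × Int × Int))) : Prop := out = split_line_into_groups_alt boxes space_x_thresh
instance (boxes : List (Int × Int × Int × Int)) (space_x_thresh : Int) (out : List (List (Int × Int × Int × Int))) : Decidable (Spec_split_line_into_groups boxes space_x_thresh out) := by unfold Spec_split_line_into_groups; infer_instance

-- ===== CLAIM (what is proved, stated in full; the proofs are below) =====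
def Claim_equal_split_line_into_groups : Prop := ∀ (boxes : List (Int × Int × Int × Int)) (space_x_thresh : Int), Dom_split_line_into_groups boxes space_x_thresh → Pre_split_line_into_groups boxes space_x_thresh → Spec_split_line_into_groups boxes space_x_thresh (split_line_into_groups boxes space_x_thresh)

-- ===== LEMMAS AND PROOFS =====

-- slices of s between consecutive entries of a boundary list
def pvSlices (s : List (Int × Int × Int × Int)) (bds : List Int) : List (List (Int × Int × Int × Int)) :=
  (bds.zip bds.tail).map (fun p => PySem.List.slice s (some p.1) (some p.2))

theorem pvSlices_append_last (s : List (Int × Int × Int × Int)) (bds : List Int) (e : Int) (h : bds ≠ []) :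
    pvSlices s (bds ++ [e]) = pvSlices s bds ++ [PySem.List.slice s (some (bds.getLast h)) (some e)] := by
  induction bds with
  | nil => exact absurd rfl h
  | cons a l ih =>
    cases l with
    | nil => simp [pvSlices]
    | cons b l' =>
      simp only [pvSlices, List.cons_append, List.tail_cons, List.zip_cons_cons, List.map_cons]
      have hih := ih (by simp)
      simp only [pvSlices, List.cons_append, List.tail_cons] at hih
      rw [hih]
      simp [List.getLast_cons]

-- extending a slice by one element
theorem pvSlice_extend (s : List (Int × Int × Int × Int)) (a : Nat) (m : Nat)
    (ham : a ≤ m) (hm : m < s.length) :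
    PySem.List.slice s (some (a : Int)) (some (m : Int)) ++ [s.getD m (0,0,0,0)] =
    PySem.List.slice s (some (a : Int)) (some ((m : Int) + 1)) := by
  rw [show ((m : Int) + 1) = ((m + 1 : Nat) : Int) by push_cast; ring]
  rw [PySem.List.slice_natCast, PySem.List.slice_natCast]
  have h1 : m + 1 - a = (m - a) + 1 := by omega
  rw [h1, List.take_add_one]
  have h2 : (s.drop a)[m - a]? = some s[m] := by
    rw [List.getElem?_drop]
    rw [List.getElem?_eq_getElem (by omega)]
    congr 1
    congr 1
    omega
  rw [h2, List.getD_eq_getElem s _ hm]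
  simp

-- a one-element slice
theorem pvSlice_singleton (s : List (Int × Int × Int × Int)) (m : Nat) (hm : m < s.length) :
    PySem.List.slice s (some (m : Int)) (some ((m : Int) + 1)) = [s.getD m (0,0,0,0)] := by
  rw [show ((m : Int) + 1) = ((m + 1 : Nat) : Int) by push_cast; ring]
  rw [PySem.List.slice_natCast]
  have h1 : m + 1 - m = 1 := by omega
  rw [h1]
  rw [List.take_one, List.head?_drop, List.getElem?_eq_getElem hm, List.getD_eq_getElem s _ hm]
  simp

-- the invariant carried through A's loop, phrased over the prefix length m
theorem pvInv (t : Int) (s : List (Int × Int × Int × Int)) (m : Nat)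
    (hm : 1 ≤ m) (hlen : m ≤ s.length) :
    ∃ (br : List Int) (L : Nat),
      br = (PySem.List.pyRange 1 (m : Int) 1).filter (pvIsBreak t s) ∧
      ((0 : Int) :: br).getLast (by simp) = (L : Int) ∧ L < m ∧
      (PySem.List.pyRange 1 (m : Int) 1).foldl (pvStepA t s) ([], [PySem.List.pyGetD s 0 (0,0,0,0)]) =
        (pvSlices s ((0 : Int) :: br), PySem.List.slice s (some (L : Int)) (some (m : Int))) := by
  induction m with
  | zero => omega
  | succ m ih =>
    by_cases hm1 : m = 0
    · subst hm1
      refine ⟨[], 0, ?_, by simp, by omega, ?_⟩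
      · rw [PySem.List.pyRange_one_eq_nil (by norm_num)]; rfl
      · rw [show ((0 + 1 : Nat) : Int) = 1 by norm_num, PySem.List.pyRange_one_eq_nil (by norm_num)]
        simp only [List.foldl_nil]
        have h0 : 0 < s.length := by omega
        refine Prod.ext ?_ ?_
        · simp [pvSlices]
        · show [PySem.List.pyGetD s 0 (0, 0, 0, 0)] =
            PySem.List.slice s (some ((0 : Nat) : Int)) (some ((0 + 1 : Nat) : Int))
          rw [show ((0 + 1 : Nat) : Int) = ((0 : Nat) : Int) + 1 by norm_num,
            pvSlice_singleton s 0 h0, PySem.List.pyGetD_zero]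
    · obtain ⟨br, L, hbr, hL, hLm, hF⟩ := ih (by omega) (by omega)
      have hmlen : m < s.length := by omega
      have hcast : ((m + 1 : Nat) : Int) = (m : Int) + 1 := by push_cast; ring
      have hrange : PySem.List.pyRange 1 ((m + 1 : Nat) : Int) 1 =
          PySem.List.pyRange 1 (m : Int) 1 ++ [(m : Int)] := by
        rw [hcast]; exact PySem.List.pyRange_one_succ_right (by omega)
      have hbm : PySem.List.pyGetD s (m : Int) (0,0,0,0) = s.getD m (0,0,0,0) :=
        PySem.List.pyGetD_natCast s m (0,0,0,0)
      by_cases hbk : pvIsBreak t s (m : Int) = true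
      · refine ⟨br ++ [(m : Int)], m, ?_, ?_, by omega, ?_⟩
        · rw [hrange, List.filter_append, ← hbr]; simp [hbk]
        · simp
        · rw [hrange, List.foldl_append, hF]
          simp only [List.foldl_cons, List.foldl_nil]
          rw [pvStepA]
          simp only [pvIsBreak] at hbk
          rw [if_pos (by exact_mod_cast of_decide_eq_true hbk)]
          refine Prod.ext ?_ ?_
          · show pvSlices s ((0 : Int) :: br) ++ [PySem.List.slice s (some (L : Int)) (some (m : Int))] =
              pvSlices s ((0 : Int) :: (br ++ [(m : Int)]))
            rw [show ((0 : Int) :: (br ++ [(m : Int)])) = ((0 : Int) :: br) ++ [(m : Int)] from rfl]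
            rw [pvSlices_append_last s ((0 : Int) :: br) (m : Int) (by simp), hL]
          · rw [hcast, hbm, pvSlice_singleton s m hmlen]
      · refine ⟨br, L, ?_, ?_, by omega, ?_⟩
        · rw [hrange, List.filter_append, ← hbr]; simp [hbk]
        · exact hL
        · rw [hrange, List.foldl_append, hF]
          simp only [List.foldl_cons, List.foldl_nil]
          rw [pvStepA]
          simp only [pvIsBreak] at hbk
          rw [if_neg (by simpa using hbk)]
          refine Prod.ext rfl ?_
          rw [hcast, hbm]
          exact pvSlice_extend s L m (by omega) hmlen

-- B's index-window map over the boundary list equals pvSlices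
theorem pvWindows (s : List (Int × Int × Int × Int)) (bds : List Int) :
    (PySem.List.pyRange 0 ((bds.length : Int) - 1) 1).map (fun j =>
      PySem.List.slice s (some (PySem.List.pyGetD bds j 0)) (some (PySem.List.pyGetD bds (j + 1) 0))) =
    pvSlices s bds := by
  rw [PySem.List.pyRange_one, List.map_map]
  apply List.ext_getElem
  · simp only [List.length_map, List.length_range, pvSlices, List.length_zip, List.length_tail]
    omega
  · intro k hk1 hk2
    simp only [List.length_map, List.length_range] at hk1
    have hk : k + 1 < bds.length := by omega
    simp only [List.getElem_map, List.getElem_range, Function.comp]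
    simp only [zero_add]
    rw [show ((k : Int) + 1) = ((k + 1 : Nat) : Int) by push_cast; ring,
      PySem.List.pyGetD_natCast, PySem.List.pyGetD_natCast]
    simp only [pvSlices, List.getElem_map, List.getElem_zip]
    rw [List.getD_eq_getElem bds 0 (by omega), List.getD_eq_getElem bds 0 hk, List.getElem_tail]

-- ===== VERDICT (by name: the statement is the Claim_ definition above) =====
theorem split_line_into_groups_spec : Claim_equal_split_line_into_groups := by
  intro boxes t _ hpre
  unfold Spec_split_line_into_groups split_line_into_groups split_line_into_groups_alt
  simp only []
  set s := PySem.List.sorted boxes (fun b => b.1) false with hs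
  have hsne : s ≠ [] := by
    rw [hs, Ne, PySem.List.sorted_eq_nil_iff]; exact hpre
  have hlen : 1 ≤ s.length := List.length_pos_iff.mpr hsne
  obtain ⟨br, L, hbr, hL, hLm, hF⟩ := pvInv t s s.length (by omega) le_rfl
  rw [hF, ← hbr]
  have hcur : PySem.List.slice s (some (L : Int)) (some (s.length : Int)) ≠ [] := by
    rw [PySem.List.slice_natCast]
    simp only [ne_eq, List.take_eq_nil_iff, List.drop_eq_nil_iff]
    omega
  rw [if_pos hcur]
  rw [show ([(0 : Int)] ++ br ++ [(s.length : Int)]) = ((0 : Int) :: br) ++ [(s.length : Int)] from rfl]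
  rw [pvWindows s (((0 : Int) :: br) ++ [(s.length : Int)])]
  rw [pvSlices_append_last s ((0 : Int) :: br) (s.length : Int) (by simp), hL]
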